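-- pv_equiv track=rewrite | github.com/Xu-Justin/automated-reasoning-and-satisfiability-asg-1 | solution.py | atMostTwoA
-- ===== SOURCE A (Python) =====
-- def atMostTwoA(n, k):
--     formula = []
--     clause = []
--
--     def _atMostTwoA(start, depth):
--         if depth == k + 1:
--             formula.append([*clause])
--             return
--         for i in range(start, n + 1):
--             clause.append(-i)
--             _atMostTwoA(i + 1, depth + 1)
--             clause.pop()
--
--     _atMostTwoA(1, 0)
--     return formula
-- ===== SOURCE B (Python) =====
-- from itertools import combinations
--
-- def atMostTwoA(n, k):
--     items = range(1, n + 1)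
--     r = k + 1
--     if r < 0 or r > len(items):
--         return []
--     return [[-i for i in combo] for combo in combinations(items, r)]
-- ===== Notes on version B (the rewrite author's own statement) =====
-- stated objective: idiomatic
-- what changed: Replaces the hand-written backtracking recursion with a mutable shared clause stack by a comprehension over itertools.combinations of range(1, n+1), negating each combination; a guard returns [] for k+1 < 0, where the recursion silently produces nothing.
-- outside the precondition, e.g. on atMostTwoA(950, 2000): A does not finish within the time limit, B returns []; on atMostTwoA(2147483648, -5): A raises RecursionError, B returns []
import Mathlib
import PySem

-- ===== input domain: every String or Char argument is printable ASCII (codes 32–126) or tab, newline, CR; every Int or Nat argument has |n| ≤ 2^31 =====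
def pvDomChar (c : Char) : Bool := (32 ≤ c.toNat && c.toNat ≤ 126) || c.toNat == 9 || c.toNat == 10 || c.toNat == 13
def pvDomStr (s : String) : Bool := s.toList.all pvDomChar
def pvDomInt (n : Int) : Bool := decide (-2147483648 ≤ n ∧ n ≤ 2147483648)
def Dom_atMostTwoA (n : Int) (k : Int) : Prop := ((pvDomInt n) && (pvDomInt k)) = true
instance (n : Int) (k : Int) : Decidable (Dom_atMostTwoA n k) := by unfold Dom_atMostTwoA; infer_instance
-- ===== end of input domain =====

-- B replaces A's backtracking recursion (shared clause stack) by mapping negation over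
-- lexicographic (k+1)-combinations of [1..n] (itertools.combinations style); idiomatic, same cost.


-- ===== PORT A =====
-- _atMostTwoA(start, depth): the for-loop over range(start, n+1) is written as recursion on
-- start; both the recursive call (depth+1, clause with -start pushed) and the loop step
-- (next i, clause popped back) decrease (n+1-start).toNat.
def atMostTwoA_rec (n k : Int) (start depth : Int) (clause : List Int)
    (formula : List (List Int)) : List (List Int) :=
  if depth = k + 1 then formula ++ [clause]
  else if h : start ≤ n then
    let f' := atMostTwoA_rec n k (start + 1) (depth + 1) (clause ++ [-start]) formula
    atMostTwoA_rec n k (start + 1) depth clause f'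
  else formula
termination_by (n + 1 - start).toNat
decreasing_by all_goals omega

def atMostTwoA (n : Int) (k : Int) : List (List Int) :=
  atMostTwoA_rec n k 1 0 [] []

-- ===== PORT B =====
-- itertools.combinations(xs, r) in lexicographic order
def pyCombinations (xs : List Int) (r : Nat) : List (List Int) :=
  match r, xs with
  | 0, _ => [[]]
  | _ + 1, [] => []
  | r + 1, x :: rest =>
      (pyCombinations rest r).map (fun c => x :: c) ++ pyCombinations rest (r + 1)

def atMostTwoA_alt (n : Int) (k : Int) : List (List Int) :=
  let items := PySem.List.pyRange 1 (n + 1) 1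
  let r := k + 1
  if r < 0 ∨ r > (items.length : Int) then []
  else (pyCombinations items r.toNat).map (fun combo => combo.map (fun i => -i))

-- ===== PRECONDITION & SPEC =====
-- Pre_ excludes inputs on which CPython A raises RecursionError: its recursion nests about
-- min(n, k+1) + 1 frames (n + 1 frames when k + 1 < 0), which overflows the default recursion
-- limit; 900 is a conservative bound, so Pre_ also excludes a thin band of deep-but-returning
-- inputs (see claim.json cites).
def Pre_atMostTwoA (n : Int) (k : Int) : Prop := n ≤ 900 ∨ (0 ≤ k + 1 ∧ k + 1 ≤ 900)
instance (n : Int) (k : Int) : Decidable (Pre_atMostTwoA n k) := by unfold Pre_atMostTwoA; infer_instance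
def pvWitness_atMostTwoA : Int × Int := (4, 1)

def Spec_atMostTwoA (n : Int) (k : Int) (out : List (List Int)) : Prop := out = atMostTwoA_alt n k
instance (n : Int) (k : Int) (out : List (List Int)) : Decidable (Spec_atMostTwoA n k out) := by unfold Spec_atMostTwoA; infer_instance

-- ===== CLAIM (what is proved, stated in full; the proofs are below) =====
def Claim_equal_atMostTwoA : Prop := ∀ (n : Int) (k : Int), Dom_atMostTwoA n k → Pre_atMostTwoA n k → Spec_atMostTwoA n k (atMostTwoA n k)

-- ===== LEMMAS AND PROOFS =====

-- When depth can never reach k+1 (k+1 < depth and depth only grows), the recursion just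
-- walks the range and leaves formula untouched.
theorem atMostTwoA_rec_of_lt (n k : Int) (start depth : Int) (clause : List Int)
    (formula : List (List Int)) (h : k + 1 < depth) :
    atMostTwoA_rec n k start depth clause formula = formula := by
  unfold atMostTwoA_rec
  rw [if_neg (by omega)]
  split
  · rw [atMostTwoA_rec_of_lt n k (start + 1) (depth + 1) _ _ (by omega),
        atMostTwoA_rec_of_lt n k (start + 1) depth _ _ h]
  · rfl
termination_by (n + 1 - start).toNat
decreasing_by all_goals omega

-- Invariant of A's recursion: it appends, to formula, clause extended by each negated
-- (k+1-depth)-combination of range(start, n+1), in lexicographic order.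
theorem atMostTwoA_rec_eq (n k : Int) (start depth : Int) (clause : List Int)
    (formula : List (List Int)) (h : depth ≤ k + 1) :
    atMostTwoA_rec n k start depth clause formula =
      formula ++ (pyCombinations (PySem.List.pyRange start (n + 1) 1) (k + 1 - depth).toNat).map
        (fun c => clause ++ c.map (fun i => -i)) := by
  unfold atMostTwoA_rec
  by_cases hd : depth = k + 1
  · rw [if_pos hd]
    have : (k + 1 - depth).toNat = 0 := by omega
    simp [this, pyCombinations]
  · rw [if_neg hd]
    have hm : ∃ m : Nat, (k + 1 - depth).toNat = m + 1 := ⟨(k - depth).toNat, by omega⟩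
    obtain ⟨m, hmEq⟩ := hm
    by_cases hs : start ≤ n
    · rw [dif_pos hs]
      have hm' : (k + 1 - (depth + 1)).toNat = m := by omega
      rw [atMostTwoA_rec_eq n k (start + 1) (depth + 1) (clause ++ [-start]) formula (by omega),
          atMostTwoA_rec_eq n k (start + 1) depth clause _ h, hmEq, hm']
      conv_rhs => rw [PySem.List.pyRange_one_cons (show start < n + 1 by omega)]
      simp [pyCombinations, List.map_append, List.map_map, List.append_assoc, Function.comp]
    · rw [dif_neg hs]
      rw [PySem.List.pyRange_one_eq_nil (by omega), hmEq]
      simp [pyCombinations]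
termination_by (n + 1 - start).toNat
decreasing_by all_goals omega

-- choosing more elements than the list has yields no combination
theorem pyCombinations_eq_nil (xs : List Int) (r : Nat) (h : xs.length < r) :
    pyCombinations xs r = [] := by
  induction xs generalizing r with
  | nil => cases r with
    | zero => omega
    | succ m => rfl
  | cons x rest ih => cases r with
    | zero => omega
    | succ m =>
      simp only [List.length_cons] at h
      cases m with
      | zero => omega
      | succ m' =>
        simp [pyCombinations, ih (m' + 1) (by omega), ih (m' + 2) (by omega)]

-- ===== VERDICT (by name: the statement is the Claim_ definition above) =====
theorem atMostTwoA_spec : Claim_equal_atMostTwoA := by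
  intro n k _ _
  unfold Spec_atMostTwoA atMostTwoA atMostTwoA_alt
  simp only [PySem.List.length_pyRange_one]
  by_cases h : k + 1 < 0 ∨ k + 1 > ((n + 1 - 1).toNat : Int)
  · rw [if_pos h]
    by_cases hneg : k + 1 < 0
    · rw [atMostTwoA_rec_of_lt n k 1 0 [] [] (by omega)]
    · rw [atMostTwoA_rec_eq n k 1 0 [] [] (by omega)]
      rw [pyCombinations_eq_nil _ _ (by rw [PySem.List.length_pyRange_one]; omega)]
      simp
  · rw [if_neg h, atMostTwoA_rec_eq n k 1 0 [] [] (by omega)]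
    simp
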